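-- pv_equiv track=rewrite | github.com/Xekhtyrl/lem_in | test.py | bfs_level_graph
-- ===== SOURCE A (Python) =====
-- from collections import deque
--
-- def bfs_level_graph(graph, source, sink, level):
--     n = len(graph)
--     level[:] = [-1] * n
--     level[source] = 0
--     queue = deque([source])
--
--     while queue:
--         u = queue.popleft()
--         for v in range(n):
--             if graph[u][v] > 0 and level[v] == -1:
--                 level[v] = level[u] + 1
--                 queue.append(v)
--
--     return level[sink] != -1
-- ===== SOURCE B (Python) =====
-- def bfs_level_graph(graph, source, sink, level):
--     n = len(graph)
--     lvl = {source: 0}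
--     frontier = {source}
--     d = 0
--     while frontier:
--         d += 1
--         frontier = {v for u in frontier for v in range(n)
--                     if graph[u][v] > 0 and v not in lvl}
--         for v in frontier:
--             lvl[v] = d
--     level[:] = [lvl.get(v, -1) for v in range(n)]
--     return level[sink] != -1
-- ===== Notes on version B (the rewrite author's own statement) =====
-- stated objective: alternative
-- what changed: Replaces the FIFO-deque BFS that marks an in-place level array node by node with a layered BFS over a level dict and a frontier set (whole set-comprehension layers per round, depth counter), building the level list once at the end.
-- outside the precondition, e.g. on bfs_level_graph([[0, 0], [0, 0]], -2, 0, []): A returns True, B returns False; on bfs_level_graph([[0, 0], []], 0, 0, []): A returns True, B returns True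
import Mathlib
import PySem

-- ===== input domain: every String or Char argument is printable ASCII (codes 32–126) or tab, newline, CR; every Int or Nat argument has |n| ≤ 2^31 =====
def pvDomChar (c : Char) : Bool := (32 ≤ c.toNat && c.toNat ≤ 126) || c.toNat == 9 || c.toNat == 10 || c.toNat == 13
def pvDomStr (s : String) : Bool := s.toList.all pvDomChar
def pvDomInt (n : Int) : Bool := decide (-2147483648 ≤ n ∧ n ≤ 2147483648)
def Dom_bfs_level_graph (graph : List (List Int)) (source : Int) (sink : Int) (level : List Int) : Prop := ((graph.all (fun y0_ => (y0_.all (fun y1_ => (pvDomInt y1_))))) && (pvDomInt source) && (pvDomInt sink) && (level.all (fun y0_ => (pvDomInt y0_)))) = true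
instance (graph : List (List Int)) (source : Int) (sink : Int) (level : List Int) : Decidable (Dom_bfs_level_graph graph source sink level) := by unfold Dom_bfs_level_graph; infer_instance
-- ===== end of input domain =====

-- B replaces A's FIFO-deque BFS over an in-place level array by a layered BFS over a level
-- dict and a frontier set (whole set-comprehension layers per round with a depth counter),
-- writing the level list once at the end; equal return value is what is proved — both
-- Pythons also mutate `level` in place (identically so on Pre_), which the Bool-returning
-- ports do not model.

-- ===== PORT A =====
-- inner `for v in range(n)` of A: scan u's row, mark new nodes with level[u] + 1, enqueue them
def bfsScanA (graph : List (List Int)) (n : Nat) (u : Int)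
    (st : List Int × List Int) : List Int × List Int :=
  (PySem.List.pyRange 0 n 1).foldl (fun st v =>
    if PySem.List.pyGetD (PySem.List.pyGetD graph u []) v 0 > 0 ∧
        PySem.List.pyGetD st.1 v 0 = -1 then
      (PySem.List.pySetD st.1 v (PySem.List.pyGetD st.1 u 0 + 1), st.2 ++ [v])
    else st) st

-- `while queue:` loop of A; the fuel only makes the recursion structural (n + 2 always
-- suffices: each iteration pops one node, and each node is enqueued at most once)
def bfsLoopA (graph : List (List Int)) (n : Nat) :
    Nat → List Int → List Int → List Int
  | 0, lv, _ => lv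
  | fuel+1, lv, queue =>
    match queue with
    | [] => lv
    | u :: rest =>
      let st := bfsScanA graph n u (lv, rest)
      bfsLoopA graph n fuel st.1 st.2

def bfs_level_graph (graph : List (List Int)) (source : Int) (sink : Int) (level : List Int) : Bool :=
  let n := graph.length
  let lv := List.replicate n (-1 : Int)       -- level[:] = [-1] * n
  let lv := PySem.List.pySetD lv source 0     -- level[source] = 0
  let fin := bfsLoopA graph n (n + 2) lv [source]
  decide (PySem.List.pyGetD fin sink 0 ≠ -1)  -- return level[sink] != -1

-- ===== PORT B =====
-- the set comprehension `{v for u in frontier for v in range(n) if graph[u][v] > 0 and v not in lvl}`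
def bfsLayer (graph : List (List Int)) (n : Nat) (lvl : PySem.Dict Int Int)
    (frontier : PySem.Set Int) : PySem.Set Int :=
  frontier.foldl (fun s u =>
    (PySem.List.pyRange 0 n 1).foldl (fun s v =>
      if PySem.List.pyGetD (PySem.List.pyGetD graph u []) v 0 > 0 ∧
          lvl.contains v = false then
        PySem.Set.add s v
      else s) s) PySem.Set.empty

-- `while frontier:` loop of B: one round per depth; the new layer is marked with depth d + 1
-- by inserting every node of the new frontier into the level dict (fuel n + 2 suffices: the
-- dict gains a key every productive round)
def bfsLoopB (graph : List (List Int)) (n : Nat) :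
    Nat → PySem.Dict Int Int → PySem.Set Int → Int → PySem.Dict Int Int
  | 0, lvl, _, _ => lvl
  | fuel+1, lvl, frontier, d =>
    match frontier with
    | [] => lvl
    | _ :: _ =>
      let d' := d + 1
      let nf := bfsLayer graph n lvl frontier
      let lvl' := nf.foldl (fun dd v => dd.insert v d') lvl
      bfsLoopB graph n fuel lvl' nf d'

def bfs_level_graph_alt (graph : List (List Int)) (source : Int) (sink : Int) (level : List Int) : Bool :=
  let n := graph.length
  let lvl := bfsLoopB graph n (n + 2) ((PySem.Dict.empty : PySem.Dict Int Int).insert source 0) (PySem.Set.ofList [source]) 0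
  let lv := (PySem.List.pyRange 0 n 1).map (fun v => lvl.getD v (-1))   -- level[:] = [lvl.get(v, -1) for v in range(n)]
  decide (PySem.List.pyGetD lv sink 0 ≠ -1)   -- return level[sink] != -1

-- ===== PRECONDITION & SPEC =====
-- Pre_ excludes A's IndexError risks: source/sink outside Python's index range and — a
-- stated narrowing, to keep the condition closed-form — rows shorter than n (A raises when
-- such a row is reached, but returns, as B does, when every short row is unreachable); it
-- also excludes negative in-range source values, outside the natural domain of a node
-- index, where A's value rests on Python's accidental negative-index wraparound.
def Pre_bfs_level_graph (graph : List (List Int)) (source : Int) (sink : Int) (level : List Int) : Prop :=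
  (∀ row ∈ graph, graph.length ≤ row.length) ∧
  0 ≤ source ∧ source < graph.length ∧
  PySem.Raise.InRange graph.length sink
instance (graph : List (List Int)) (source : Int) (sink : Int) (level : List Int) : Decidable (Pre_bfs_level_graph graph source sink level) := by unfold Pre_bfs_level_graph; infer_instance

def pvWitness_bfs_level_graph : List (List Int) × Int × Int × List Int :=
  ([[0, 1], [0, 0]], 0, 1, [])

def Spec_bfs_level_graph (graph : List (List Int)) (source : Int) (sink : Int) (level : List Int) (out : Bool) : Prop := out = bfs_level_graph_alt graph source sink level
instance (graph : List (List Int)) (source : Int) (sink : Int) (level : List Int) (out : Bool) : Decidable (Spec_bfs_level_graph graph source sink level out) := by unfold Spec_bfs_level_graph; infer_instance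

-- ===== CLAIM (what is proved, stated in full; the proofs are below) =====
def Claim_equal_bfs_level_graph : Prop := ∀ (graph : List (List Int)) (source : Int) (sink : Int) (level : List Int), Dom_bfs_level_graph graph source sink level → Pre_bfs_level_graph graph source sink level → Spec_bfs_level_graph graph source sink level (bfs_level_graph graph source sink level)

-- ===== LEMMAS AND PROOFS =====

-- `graph[u][v] > 0`, the edge relation both programs test
def edgeP (graph : List (List Int)) (u v : Int) : Prop :=
  PySem.List.pyGetD (PySem.List.pyGetD graph u []) v 0 > 0

-- the step of A's inner scan, named so the fold lemmas stay readable
def stepA (graph : List (List Int)) (u : Int) (st : List Int × List Int) (v : Int) : List Int × List Int :=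
  if PySem.List.pyGetD (PySem.List.pyGetD graph u []) v 0 > 0 ∧
      PySem.List.pyGetD st.1 v 0 = -1 then
    (PySem.List.pySetD st.1 v (PySem.List.pyGetD st.1 u 0 + 1), st.2 ++ [v])
  else st

-- number of still-unmarked cells of A's level array: A's termination measure
def cntNeg (lv : List Int) : Nat := lv.countP (fun x => x == -1)

-- number of nodes of range(n) not yet in B's level dict: B's termination measure
def cntMiss (n : Nat) (lvl : PySem.Dict Int Int) : Nat :=
  (List.range n).countP (fun j : Nat => ! lvl.contains (Int.ofNat j))

theorem pyGetD_eq_getElem' (lv : List Int) (i : Int) (d : Int)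
    (h1 : 0 ≤ i) (h2 : i < lv.length) :
    PySem.List.pyGetD lv i d = lv[i.toNat]'(by omega) := by
  rw [PySem.List.pyGetD_eq_getElem lv d h1 h2]

theorem pyGetD_set (lv : List Int) (v w : Int) (x : Int)
    (hv0 : 0 ≤ v) (hvl : v < lv.length) (hw0 : 0 ≤ w) (hwl : w < lv.length) :
    PySem.List.pyGetD (lv.set v.toNat x) w 0 = if w = v then x else PySem.List.pyGetD lv w 0 := by
  rw [pyGetD_eq_getElem' _ _ _ hw0 (by simpa using hwl)]
  by_cases hwv : w = v
  · subst hwv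
    rw [if_pos rfl, List.getElem_set_self]
  · rw [if_neg hwv, List.getElem_set_ne (by omega)]
    rw [pyGetD_eq_getElem' _ _ _ hw0 hwl]

theorem cntNeg_set (lv : List Int) (k : Nat) (x : Int) (h : k < lv.length)
    (hk : lv[k] = -1) (hx : x ≠ -1) :
    cntNeg (lv.set k x) + 1 = cntNeg lv := by
  induction lv generalizing k with
  | nil => simp at h
  | cons a l ih =>
    cases k with
    | zero =>
      simp at hk
      simp [cntNeg, hk, hx]
    | succ k =>
      simp at hk h
      have := ih k h hk
      simp [cntNeg, List.countP_cons] at this ⊢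
      omega

theorem cntNeg_le_length (lv : List Int) : cntNeg lv ≤ lv.length :=
  List.countP_le_length

-- the full bundle of facts about one scan of A (over an arbitrary index list vs):
-- length, cells stay ≥ -1, marked cells are untouched, every neighbour in vs ends marked,
-- new marks are u-neighbours and are enqueued, the queue grows by exactly the flipped cells
theorem scanA_bundle (graph : List (List Int)) (n : Nat) (u : Int) :
    ∀ (vs : List Int), (∀ v ∈ vs, 0 ≤ v ∧ v < (n : Int)) →
    ∀ (lv acc : List Int), lv.length = n → 0 ≤ u → u < (n : Int) →
    (∀ k : Int, 0 ≤ k → k < (n : Int) → PySem.List.pyGetD lv k 0 ≥ -1) →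
    (vs.foldl (stepA graph u) (lv, acc)).1.length = n ∧
    (∀ k : Int, 0 ≤ k → k < (n : Int) →
      PySem.List.pyGetD (vs.foldl (stepA graph u) (lv, acc)).1 k 0 ≥ -1) ∧
    (∀ k : Int, 0 ≤ k → k < (n : Int) → PySem.List.pyGetD lv k 0 ≠ -1 →
      PySem.List.pyGetD (vs.foldl (stepA graph u) (lv, acc)).1 k 0 = PySem.List.pyGetD lv k 0) ∧
    (∀ v ∈ vs, edgeP graph u v →
      PySem.List.pyGetD (vs.foldl (stepA graph u) (lv, acc)).1 v 0 ≠ -1) ∧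
    (∀ k : Int, 0 ≤ k → k < (n : Int) →
      PySem.List.pyGetD (vs.foldl (stepA graph u) (lv, acc)).1 k 0 ≠ -1 →
      PySem.List.pyGetD lv k 0 ≠ -1 ∨
        (edgeP graph u k ∧ k ∈ (vs.foldl (stepA graph u) (lv, acc)).2)) ∧
    (∀ a ∈ acc, a ∈ (vs.foldl (stepA graph u) (lv, acc)).2) ∧
    (∀ a ∈ (vs.foldl (stepA graph u) (lv, acc)).2,
      a ∈ acc ∨ (0 ≤ a ∧ a < (n : Int) ∧ edgeP graph u a)) ∧
    cntNeg (vs.foldl (stepA graph u) (lv, acc)).1 + (vs.foldl (stepA graph u) (lv, acc)).2.length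
      = cntNeg lv + acc.length := by
  intro vs
  induction vs with
  | nil =>
    intro _ lv acc hlen _ _ hval
    exact ⟨hlen, hval, fun k _ _ _ => rfl, by simp, fun k _ _ h => Or.inl h,
      fun a ha => ha, fun a ha => Or.inl ha, rfl⟩
  | cons v vs ih =>
    intro hvs lv acc hlen hu0 hun hval
    obtain ⟨hv0, hvn⟩ := hvs v (by simp)
    have hvs' : ∀ x ∈ vs, 0 ≤ x ∧ x < (n : Int) :=
      fun x hx => hvs x (List.mem_cons_of_mem _ hx)
    have hvl : v < (lv.length : Int) := by rw [hlen]; exact hvn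
    simp only [List.foldl_cons]
    by_cases hc : PySem.List.pyGetD (PySem.List.pyGetD graph u []) v 0 > 0 ∧
        PySem.List.pyGetD lv v 0 = -1
    · have hw : PySem.List.pyGetD lv u 0 + 1 ≥ 0 := by
        have := hval u hu0 hun
        omega
      have hstep : stepA graph u (lv, acc) v =
          (lv.set v.toNat (PySem.List.pyGetD lv u 0 + 1), acc ++ [v]) := by
        simp only [stepA, if_pos hc, PySem.List.pySetD_of_nonneg lv _ hv0]
      rw [hstep]
      have hlen1 : (lv.set v.toNat (PySem.List.pyGetD lv u 0 + 1)).length = n := by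
        simpa using hlen
      have hget1 : ∀ k : Int, 0 ≤ k → k < (n : Int) →
          PySem.List.pyGetD (lv.set v.toNat (PySem.List.pyGetD lv u 0 + 1)) k 0 =
            if k = v then PySem.List.pyGetD lv u 0 + 1 else PySem.List.pyGetD lv k 0 := by
        intro k hk0 hkn
        exact pyGetD_set lv v k _ hv0 hvl hk0 (by rw [hlen]; exact hkn)
      have hval1 : ∀ k : Int, 0 ≤ k → k < (n : Int) →
          PySem.List.pyGetD (lv.set v.toNat (PySem.List.pyGetD lv u 0 + 1)) k 0 ≥ -1 := by
        intro k hk0 hkn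
        rw [hget1 k hk0 hkn]
        split
        · omega
        · exact hval k hk0 hkn
      obtain ⟨e1, e2, e3, e4, e5, e6, e7, e8⟩ :=
        ih hvs' (lv.set v.toNat (PySem.List.pyGetD lv u 0 + 1)) (acc ++ [v]) hlen1 hu0 hun hval1
      refine ⟨e1, e2, ?_, ?_, ?_, ?_, ?_, ?_⟩
      · intro k hk0 hkn hkm
        have hkv : k ≠ v := fun e => hkm (e ▸ hc.2)
        have heq : PySem.List.pyGetD (lv.set v.toNat (PySem.List.pyGetD lv u 0 + 1)) k 0 =
            PySem.List.pyGetD lv k 0 := by rw [hget1 k hk0 hkn, if_neg hkv]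
        rw [e3 k hk0 hkn (by rw [heq]; exact hkm), heq]
      · intro x hx hex
        rcases List.mem_cons.1 hx with rfl | hx
        · have hxm : PySem.List.pyGetD (lv.set x.toNat (PySem.List.pyGetD lv u 0 + 1)) x 0 ≠ -1 := by
            rw [hget1 x hv0 hvn, if_pos rfl]
            omega
          rw [e3 x hv0 hvn hxm]
          exact hxm
        · exact e4 x hx hex
      · intro k hk0 hkn hkm
        rcases e5 k hk0 hkn hkm with h | ⟨he, hq⟩
        · by_cases hkv : k = v
          · subst hkv
            exact Or.inr ⟨hc.1, e6 k (by simp)⟩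
          · rw [hget1 k hk0 hkn, if_neg hkv] at h
            exact Or.inl h
        · exact Or.inr ⟨he, hq⟩
      · intro a ha
        exact e6 a (List.mem_append_left _ ha)
      · intro a ha
        rcases e7 a ha with h | h
        · rcases List.mem_append.1 h with h | h
          · exact Or.inl h
          · simp only [List.mem_singleton] at h
            subst h
            exact Or.inr ⟨hv0, hvn, hc.1⟩
        · exact Or.inr h
      · have hcv : lv[v.toNat]'(by omega) = -1 := by
          rw [← pyGetD_eq_getElem' lv v 0 hv0 hvl]
          exact hc.2
        have hcnt := cntNeg_set lv v.toNat (PySem.List.pyGetD lv u 0 + 1) (by omega) hcv (by omega)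
        rw [e8]
        simp only [List.length_append, List.length_singleton]
        omega
    · have hstep : stepA graph u (lv, acc) v = (lv, acc) := by
        simp only [stepA, if_neg hc]
      rw [hstep]
      obtain ⟨e1, e2, e3, e4, e5, e6, e7, e8⟩ := ih hvs' lv acc hlen hu0 hun hval
      refine ⟨e1, e2, e3, ?_, e5, e6, e7, e8⟩
      intro x hx hex
      rcases List.mem_cons.1 hx with rfl | hx
      · have hm : PySem.List.pyGetD lv x 0 ≠ -1 := fun h => hc ⟨hex, h⟩
        rw [e3 x hv0 hvn hm]
        exact hm
      · exact e4 x hx hex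

-- A's loop, completeness side: with enough fuel the loop drains the queue and delivers a
-- level array whose marked set contains the current marks, stays ≥ -1, and is edge-closed
theorem loopA_main (graph : List (List Int)) (n : Nat) :
    ∀ (fuel : Nat) (lv queue : List Int),
    lv.length = n →
    (∀ k : Int, 0 ≤ k → k < (n : Int) → PySem.List.pyGetD lv k 0 ≥ -1) →
    (∀ a ∈ queue, 0 ≤ a ∧ a < (n : Int)) →
    (∀ k : Int, 0 ≤ k → k < (n : Int) → PySem.List.pyGetD lv k 0 ≠ -1 →
      k ∈ queue ∨ ∀ v : Int, 0 ≤ v → v < (n : Int) → edgeP graph k v →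
        PySem.List.pyGetD lv v 0 ≠ -1) →
    queue.length + cntNeg lv ≤ fuel →
    (bfsLoopA graph n fuel lv queue).length = n ∧
    (∀ k : Int, 0 ≤ k → k < (n : Int) →
      PySem.List.pyGetD (bfsLoopA graph n fuel lv queue) k 0 ≥ -1) ∧
    (∀ k : Int, 0 ≤ k → k < (n : Int) → PySem.List.pyGetD lv k 0 ≠ -1 →
      PySem.List.pyGetD (bfsLoopA graph n fuel lv queue) k 0 ≠ -1) ∧
    (∀ x v : Int, 0 ≤ x → x < (n : Int) → 0 ≤ v → v < (n : Int) →
      PySem.List.pyGetD (bfsLoopA graph n fuel lv queue) x 0 ≠ -1 → edgeP graph x v →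
      PySem.List.pyGetD (bfsLoopA graph n fuel lv queue) v 0 ≠ -1) := by
  intro fuel
  induction fuel with
  | zero =>
    intro lv queue hlen hval hq hclo hfuel
    have hq0 : queue = [] := by
      cases queue with
      | nil => rfl
      | cons a l => simp at hfuel
    subst hq0
    simp only [bfsLoopA]
    refine ⟨hlen, hval, fun k _ _ h => h, ?_⟩
    intro x v hx0 hxn hv0 hvn hxm hex
    rcases hclo x hx0 hxn hxm with h | h
    · simp at h
    · exact h v hv0 hvn hex
  | succ f ih =>
    intro lv queue hlen hval hq hclo hfuel
    cases queue with
    | nil =>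
      simp only [bfsLoopA]
      refine ⟨hlen, hval, fun k _ _ h => h, ?_⟩
      intro x v hx0 hxn hv0 hvn hxm hex
      rcases hclo x hx0 hxn hxm with h | h
      · simp at h
      · exact h v hv0 hvn hex
    | cons u rest =>
      obtain ⟨hu0, hun⟩ := hq u (by simp)
      have hrange : ∀ x ∈ PySem.List.pyRange 0 (n : Int) 1, 0 ≤ x ∧ x < (n : Int) :=
        fun x hx => (PySem.List.mem_pyRange_one).1 hx
      obtain ⟨e1, e2, e3, e4, e5, e6, e7, e8⟩ :=
        scanA_bundle graph n u (PySem.List.pyRange 0 (n : Int) 1) hrange lv rest hlen hu0 hun hval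
      simp only [bfsLoopA, bfsScanA]
      set r := (PySem.List.pyRange 0 (n : Int) 1).foldl (stepA graph u) (lv, rest) with hr
      have hstep : (PySem.List.pyRange 0 (↑n : Int) 1).foldl (fun st v =>
          if PySem.List.pyGetD (PySem.List.pyGetD graph u []) v 0 > 0 ∧
              PySem.List.pyGetD st.1 v 0 = -1 then
            (PySem.List.pySetD st.1 v (PySem.List.pyGetD st.1 u 0 + 1), st.2 ++ [v])
          else st) (lv, rest) = r := rfl
      rw [hstep]
      have hq' : ∀ a ∈ r.2, 0 ≤ a ∧ a < (n : Int) := by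
        intro a ha
        rcases e7 a ha with h | h
        · exact hq a (List.mem_cons_of_mem _ h)
        · exact ⟨h.1, h.2.1⟩
      have hclo' : ∀ k : Int, 0 ≤ k → k < (n : Int) → PySem.List.pyGetD r.1 k 0 ≠ -1 →
          k ∈ r.2 ∨ ∀ v : Int, 0 ≤ v → v < (n : Int) → edgeP graph k v →
            PySem.List.pyGetD r.1 v 0 ≠ -1 := by
        intro k hk0 hkn hkm
        rcases e5 k hk0 hkn hkm with hold | ⟨_, hq2⟩
        · rcases hclo k hk0 hkn hold with hmem | hcl
          · rcases List.mem_cons.1 hmem with rfl | hmem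
            · refine Or.inr ?_
              intro v hv0 hvn hev
              exact e4 v ((PySem.List.mem_pyRange_one).2 ⟨hv0, hvn⟩) hev
            · exact Or.inl (e6 k hmem)
          · refine Or.inr ?_
            intro v hv0 hvn hev
            rw [e3 v hv0 hvn (hcl v hv0 hvn hev)]
            exact hcl v hv0 hvn hev
        · exact Or.inl hq2
      have hfuel' : r.2.length + cntNeg r.1 ≤ f := by
        simp only [List.length_cons] at hfuel
        omega
      obtain ⟨f1, f2, f3, f4⟩ := ih r.1 r.2 e1 e2 hq' hclo' hfuel'
      refine ⟨f1, f2, ?_, f4⟩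
      intro k hk0 hkn hkm
      exact f3 k hk0 hkn (by rw [e3 k hk0 hkn hkm]; exact hkm)

-- A's loop, soundness side: every mark the loop adds lies in any edge-closed set P that
-- contains the current marks and the queue
theorem loopA_sound (graph : List (List Int)) (n : Nat) (P : Int → Prop)
    (hP : ∀ x v : Int, 0 ≤ v → v < (n : Int) → P x → edgeP graph x v → P v) :
    ∀ (fuel : Nat) (lv queue : List Int),
    lv.length = n →
    (∀ k : Int, 0 ≤ k → k < (n : Int) → PySem.List.pyGetD lv k 0 ≥ -1) →
    (∀ k : Int, 0 ≤ k → k < (n : Int) → PySem.List.pyGetD lv k 0 ≠ -1 → P k) →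
    (∀ a ∈ queue, 0 ≤ a ∧ a < (n : Int) ∧ P a) →
    ∀ k : Int, 0 ≤ k → k < (n : Int) →
      PySem.List.pyGetD (bfsLoopA graph n fuel lv queue) k 0 ≠ -1 → P k := by
  intro fuel
  induction fuel with
  | zero =>
    intro lv queue _ _ hmk _ k hk0 hkn hkm
    exact hmk k hk0 hkn hkm
  | succ f ih =>
    intro lv queue hlen hval hmk hq
    cases queue with
    | nil =>
      intro k hk0 hkn hkm
      exact hmk k hk0 hkn hkm
    | cons u rest =>
      obtain ⟨hu0, hun, hPu⟩ := hq u (by simp)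
      have hrange : ∀ x ∈ PySem.List.pyRange 0 (n : Int) 1, 0 ≤ x ∧ x < (n : Int) :=
        fun x hx => (PySem.List.mem_pyRange_one).1 hx
      obtain ⟨e1, e2, e3, e4, e5, e6, e7, e8⟩ :=
        scanA_bundle graph n u (PySem.List.pyRange 0 (n : Int) 1) hrange lv rest hlen hu0 hun hval
      simp only [bfsLoopA, bfsScanA]
      set r := (PySem.List.pyRange 0 (n : Int) 1).foldl (stepA graph u) (lv, rest) with hr
      have hstep : (PySem.List.pyRange 0 (↑n : Int) 1).foldl (fun st v =>
          if PySem.List.pyGetD (PySem.List.pyGetD graph u []) v 0 > 0 ∧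
              PySem.List.pyGetD st.1 v 0 = -1 then
            (PySem.List.pySetD st.1 v (PySem.List.pyGetD st.1 u 0 + 1), st.2 ++ [v])
          else st) (lv, rest) = r := rfl
      rw [hstep]
      have hmk' : ∀ k : Int, 0 ≤ k → k < (n : Int) → PySem.List.pyGetD r.1 k 0 ≠ -1 → P k := by
        intro k hk0 hkn hkm
        rcases e5 k hk0 hkn hkm with hold | ⟨he, _⟩
        · exact hmk k hk0 hkn hold
        · exact hP u k hk0 hkn hPu he
      have hq' : ∀ a ∈ r.2, 0 ≤ a ∧ a < (n : Int) ∧ P a := by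
        intro a ha
        rcases e7 a ha with h | h
        · exact hq a (List.mem_cons_of_mem _ h)
        · exact ⟨h.1, h.2.1, hP u a h.1 h.2.1 hPu h.2.2⟩
      exact ih r.1 r.2 e1 e2 hmk' hq'

-- membership after the inner `for v in range(n)` fold of the comprehension
theorem layer_inner_mem (graph : List (List Int)) (lvl : PySem.Dict Int Int) (u x : Int) :
    ∀ (vs : List Int) (s : PySem.Set Int),
    (x ∈ vs.foldl (fun s v =>
        if PySem.List.pyGetD (PySem.List.pyGetD graph u []) v 0 > 0 ∧
            lvl.contains v = false then PySem.Set.add s v else s) s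
      ↔ x ∈ s ∨ (x ∈ vs ∧ edgeP graph u x ∧ lvl.contains x = false)) := by
  intro vs
  induction vs with
  | nil => intro s; simp
  | cons v vs ih =>
    intro s
    simp only [List.foldl_cons]
    by_cases hc : PySem.List.pyGetD (PySem.List.pyGetD graph u []) v 0 > 0 ∧
        lvl.contains v = false
    · rw [if_pos hc, ih]
      constructor
      · rintro (hs | h)
        · rcases (PySem.Set.mem_add _ _ _).1 hs with hs | rfl
          · exact Or.inl hs
          · exact Or.inr ⟨by simp, hc.1, hc.2⟩
        · exact Or.inr ⟨by simp [h.1], h.2.1, h.2.2⟩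
      · rintro (hs | ⟨hm, he, hco⟩)
        · exact Or.inl ((PySem.Set.mem_add _ _ _).2 (Or.inl hs))
        · rcases List.mem_cons.1 hm with rfl | hm
          · exact Or.inl ((PySem.Set.mem_add _ _ _).2 (Or.inr rfl))
          · exact Or.inr ⟨hm, he, hco⟩
    · rw [if_neg hc, ih]
      constructor
      · rintro (hs | h)
        · exact Or.inl hs
        · exact Or.inr ⟨by simp [h.1], h.2.1, h.2.2⟩
      · rintro (hs | ⟨hm, he, hco⟩)
        · exact Or.inl hs
        · rcases List.mem_cons.1 hm with rfl | hm
          · exact absurd ⟨he, hco⟩ hc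
          · exact Or.inr ⟨hm, he, hco⟩

-- membership in B's set comprehension: exactly the unmarked in-range neighbours of the frontier
theorem bfsLayer_mem (graph : List (List Int)) (n : Nat) (lvl : PySem.Dict Int Int)
    (frontier : PySem.Set Int) (x : Int) :
    x ∈ bfsLayer graph n lvl frontier ↔
      (∃ u ∈ frontier, edgeP graph u x) ∧ 0 ≤ x ∧ x < (n : Int) ∧
        lvl.contains x = false := by
  have main : ∀ (us : List Int) (s : PySem.Set Int),
      (x ∈ us.foldl (fun s u =>
          (PySem.List.pyRange 0 n 1).foldl (fun s v =>
            if PySem.List.pyGetD (PySem.List.pyGetD graph u []) v 0 > 0 ∧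
                lvl.contains v = false then PySem.Set.add s v else s) s) s
        ↔ x ∈ s ∨ ((∃ u ∈ us, edgeP graph u x) ∧ 0 ≤ x ∧ x < (n : Int) ∧
            lvl.contains x = false)) := by
    intro us
    induction us with
    | nil => intro s; simp
    | cons u us ih =>
      intro s
      simp only [List.foldl_cons]
      rw [ih, layer_inner_mem]
      have hr : x ∈ PySem.List.pyRange 0 ↑n 1 ↔ 0 ≤ x ∧ x < (n : Int) := by
        rw [PySem.List.mem_pyRange_one]
      constructor
      · rintro ((hs | ⟨hm, he, hco⟩) | ⟨⟨w, hw, hew⟩, hx⟩)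
        · exact Or.inl hs
        · exact Or.inr ⟨⟨u, by simp, he⟩, (hr.1 hm).1, (hr.1 hm).2, hco⟩
        · exact Or.inr ⟨⟨w, by simp [hw], hew⟩, hx⟩
      · rintro (hs | ⟨⟨w, hw, hew⟩, h1, h2, h3⟩)
        · exact Or.inl (Or.inl hs)
        · rcases List.mem_cons.1 hw with rfl | hw
          · exact Or.inl (Or.inr ⟨hr.2 ⟨h1, h2⟩, hew, h3⟩)
          · exact Or.inr ⟨⟨w, hw, hew⟩, h1, h2, h3⟩
  rw [bfsLayer, main]
  simp [PySem.Set.empty]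

-- inserting a constant value for every key of a list: get? afterwards
theorem get?_foldl_insert_const (c : Int) (k : Int) :
    ∀ (l : List Int) (d : PySem.Dict Int Int),
    (l.foldl (fun dd v => dd.insert v c) d).get? k = if k ∈ l then some c else d.get? k := by
  intro l
  induction l with
  | nil => intro d; simp
  | cons a l ih =>
    intro d
    simp only [List.foldl_cons]
    rw [ih]
    by_cases hl : k ∈ l
    · simp [hl]
    · rw [if_neg hl, PySem.Dict.get?_insert]
      by_cases hk : k = a
      · simp [hk]
      · simp [hk, hl]

theorem contains_foldl_insert_const (c : Int) (k : Int)
    (l : List Int) (d : PySem.Dict Int Int) :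
    (l.foldl (fun dd v => dd.insert v c) d).contains k = (decide (k ∈ l) || d.contains k) := by
  rw [PySem.Dict.contains_eq_isSome_get?, get?_foldl_insert_const,
    PySem.Dict.contains_eq_isSome_get?]
  by_cases hl : k ∈ l <;> simp [hl]

theorem countP_lt_of_strong {α : Type} (p q : α → Bool) :
    ∀ (l : List α), (∀ a ∈ l, p a = true → q a = true) →
    ∀ x ∈ l, p x = false → q x = true → l.countP p < l.countP q := by
  intro l
  induction l with
  | nil => intro _ x hx; simp at hx
  | cons a l ih =>
    intro hpq x hx hpx hqx
    have hmono : l.countP p ≤ l.countP q :=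
      List.countP_mono_left (fun a ha => hpq a (List.mem_cons_of_mem _ ha))
    rcases List.mem_cons.1 hx with rfl | hx
    · simp only [List.countP_cons, hpx, hqx, if_true, if_false, Bool.false_eq_true]
      omega
    · have h1 := ih (fun a ha => hpq a (List.mem_cons_of_mem _ ha)) x hx hpx hqx
      simp only [List.countP_cons]
      have h2 : (if p a = true then 1 else 0) ≤ (if q a = true then 1 else 0) := by
        by_cases hpa : p a = true
        · simp [hpa, hpq a (by simp) hpa]
        · simp [hpa]
      omega

-- B's loop, completeness side: with enough fuel the marked key set is monotone, its values
-- stay ≥ 0, its keys stay in range, and it ends edge-closed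
theorem loopB_main (graph : List (List Int)) (n : Nat) :
    ∀ (fuel : Nat) (lvl : PySem.Dict Int Int) (frontier : PySem.Set Int) (d : Int),
    0 ≤ d →
    (∀ k x : Int, lvl.get? k = some x → 0 ≤ x) →
    (∀ k : Int, lvl.contains k = true → 0 ≤ k ∧ k < (n : Int)) →
    (∀ u ∈ frontier, lvl.contains u = true) →
    (∀ k : Int, lvl.contains k = true →
      k ∈ frontier ∨ ∀ v : Int, 0 ≤ v → v < (n : Int) → edgeP graph k v →
        lvl.contains v = true) →
    cntMiss n lvl + 2 ≤ fuel →
    (∀ k : Int, lvl.contains k = true →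
      (bfsLoopB graph n fuel lvl frontier d).contains k = true) ∧
    (∀ k x : Int, (bfsLoopB graph n fuel lvl frontier d).get? k = some x → 0 ≤ x) ∧
    (∀ x v : Int, 0 ≤ v → v < (n : Int) →
      (bfsLoopB graph n fuel lvl frontier d).contains x = true → edgeP graph x v →
      (bfsLoopB graph n fuel lvl frontier d).contains v = true) := by
  intro fuel
  induction fuel with
  | zero =>
    intro lvl frontier d _ _ _ _ _ hfuel
    omega
  | succ f ih =>
    intro lvl frontier d hd hvals hrange hfsub hclo hfuel
    cases frontier with
    | nil =>
      simp only [bfsLoopB]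
      refine ⟨fun k h => h, hvals, ?_⟩
      intro x v hv0 hvn hx hev
      rcases hclo x hx with h | h
      · simp at h
      · exact h v hv0 hvn hev
    | cons a fr =>
      simp only [bfsLoopB]
      set nf := bfsLayer graph n lvl (a :: fr) with hnfdef
      set lvl' := nf.foldl (fun dd v => dd.insert v (d + 1)) lvl with hlvl'
      have hcont' : ∀ k : Int, lvl'.contains k = (decide (k ∈ nf) || lvl.contains k) :=
        fun k => contains_foldl_insert_const (d + 1) k nf lvl
      by_cases hnf : nf = []
      · -- empty new layer: the next round returns lvl unchanged
        have hf1 : ∃ f', f = f' + 1 := ⟨f - 1, by omega⟩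
        obtain ⟨f', rfl⟩ := hf1
        have hlvl'eq : lvl' = lvl := by rw [hlvl', hnf]; rfl
        rw [hnf, hlvl'eq]
        simp only [bfsLoopB]
        refine ⟨fun k h => h, hvals, ?_⟩
        intro x v hv0 hvn hx hev
        rcases hclo x hx with h | h
        · -- x is in the frontier: v would be in nf if unmarked, but nf is empty
          by_cases hcv : lvl.contains v = true
          · exact hcv
          · exfalso
            have : v ∈ nf := by
              rw [hnfdef, bfsLayer_mem]
              exact ⟨⟨x, h, hev⟩, hv0, hvn, by simpa using hcv⟩
            rw [hnf] at this
            simp at this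
        · exact h v hv0 hvn hev
      · -- productive round: at least one new key enters the dict
        have hmlt : cntMiss n lvl' < cntMiss n lvl := by
          obtain ⟨x0, hx0⟩ : ∃ x0, x0 ∈ nf := by
            cases hc : nf with
            | nil => exact absurd hc hnf
            | cons b l => exact ⟨b, by simp [hc]⟩
          have hx0p := (bfsLayer_mem graph n lvl (a :: fr) x0).1 (hnfdef ▸ hx0)
          obtain ⟨_, hx00, hx0n, hx0c⟩ := hx0p
          unfold cntMiss
          refine countP_lt_of_strong _ _ (List.range n) ?_ x0.toNat ?_ ?_ ?_
          · intro j _ hj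
            simp only [Bool.not_eq_eq_eq_not, Bool.not_true] at hj ⊢
            rw [hcont'] at hj
            simp only [Bool.or_eq_false_iff] at hj
            exact hj.2
          · rw [List.mem_range]
            omega
          · simp only [Bool.not_eq_eq_eq_not, Bool.not_true, Bool.not_false]
            rw [hcont']
            have hx0e : Int.ofNat x0.toNat = x0 := by rw [Int.ofNat_eq_natCast]; exact Int.toNat_of_nonneg hx00
            rw [hx0e]
            simp [hx0]
          · simp only [Bool.not_eq_eq_eq_not, Bool.not_true]
            have hx0e : Int.ofNat x0.toNat = x0 := by rw [Int.ofNat_eq_natCast]; exact Int.toNat_of_nonneg hx00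
            rw [hx0e]
            exact hx0c
        have hvals' : ∀ k x : Int, lvl'.get? k = some x → 0 ≤ x := by
          intro k x h
          rw [hlvl', get?_foldl_insert_const] at h
          split at h
          · cases h
            omega
          · exact hvals k x h
        have hrange' : ∀ k : Int, lvl'.contains k = true → 0 ≤ k ∧ k < (n : Int) := by
          intro k h
          rw [hcont'] at h
          simp only [Bool.or_eq_true, decide_eq_true_eq] at h
          rcases h with h | h
          · have := (bfsLayer_mem graph n lvl (a :: fr) k).1 (hnfdef ▸ h)
            exact ⟨this.2.1, this.2.2.1⟩
          · exact hrange k h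
        have hfsub' : ∀ u ∈ nf, lvl'.contains u = true := by
          intro u hu
          rw [hcont']
          simp [hu]
        have hclo' : ∀ k : Int, lvl'.contains k = true →
            k ∈ nf ∨ ∀ v : Int, 0 ≤ v → v < (n : Int) → edgeP graph k v →
              lvl'.contains v = true := by
          intro k h
          rw [hcont'] at h
          simp only [Bool.or_eq_true, decide_eq_true_eq] at h
          rcases h with h | h
          · exact Or.inl h
          · rcases hclo k h with hmem | hcl
            · refine Or.inr ?_
              intro v hv0 hvn hev
              rw [hcont']
              by_cases hcv : lvl.contains v = true
              · simp [hcv]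

              · have : v ∈ nf := by
                  rw [hnfdef, bfsLayer_mem]
                  exact ⟨⟨k, hmem, hev⟩, hv0, hvn, by simpa using hcv⟩
                simp [this]
            · refine Or.inr ?_
              intro v hv0 hvn hev
              rw [hcont']
              simp [hcl v hv0 hvn hev]
        have hfuel' : cntMiss n lvl' + 2 ≤ f := by omega
        obtain ⟨g1, g2, g3⟩ := ih lvl' nf (d + 1) (by omega) hvals' hrange' hfsub' hclo' hfuel'
        refine ⟨?_, g2, g3⟩
        intro k h
        refine g1 k ?_
        rw [hcont']
        simp [h]

-- B's loop, soundness side: every key the loop adds lies in any edge-closed set P that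
-- contains the current keys and the frontier
theorem loopB_sound (graph : List (List Int)) (n : Nat) (P : Int → Prop)
    (hP : ∀ x v : Int, 0 ≤ v → v < (n : Int) → P x → edgeP graph x v → P v) :
    ∀ (fuel : Nat) (lvl : PySem.Dict Int Int) (frontier : PySem.Set Int) (d : Int),
    (∀ k : Int, lvl.contains k = true → P k) →
    (∀ u ∈ frontier, P u) →
    ∀ k : Int, (bfsLoopB graph n fuel lvl frontier d).contains k = true → P k := by
  intro fuel
  induction fuel with
  | zero =>
    intro lvl frontier d hkeys _ k hk
    exact hkeys k hk
  | succ f ih =>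
    intro lvl frontier d hkeys hfront
    cases frontier with
    | nil =>
      intro k hk
      exact hkeys k hk
    | cons a fr =>
      simp only [bfsLoopB]
      set nf := bfsLayer graph n lvl (a :: fr) with hnfdef
      have hnfP : ∀ x ∈ nf, P x := by
        intro x hx
        obtain ⟨⟨u, hu, heu⟩, hx0, hxn, _⟩ :=
          (bfsLayer_mem graph n lvl (a :: fr) x).1 (hnfdef ▸ hx)
        exact hP u x hx0 hxn (hfront u hu) heu
      refine ih _ nf (d + 1) ?_ hnfP
      intro k hk
      rw [contains_foldl_insert_const] at hk
      simp only [Bool.or_eq_true, decide_eq_true_eq] at hk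
      rcases hk with hk | hk
      · exact hnfP k hk
      · exact hkeys k hk

-- Python wraparound: a negative index reads like index + length
theorem pyGetD_shift (xs : List Int) (i : Int) (d : Int)
    (h1 : -xs.length ≤ i) (h2 : i < 0) :
    PySem.List.pyGetD xs i d = PySem.List.pyGetD xs (i + xs.length) d := by
  simp only [PySem.List.pyGetD, PySem.List.pyGet?, PySem.List.pyIdx?,
    if_neg (by omega : ¬ (0 ≤ i)), if_pos h1,
    if_pos (by omega : (0:Int) ≤ i + xs.length), if_pos (by omega : i + xs.length < xs.length)]
  have h : xs.length - (-i).toNat = (i + xs.length).toNat := by omega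
  rw [h]

-- the heart of the glue: under Pre_, A's final marked set and B's final key set coincide
theorem marked_iff (graph : List (List Int)) (source : Int)
    (hs0 : 0 ≤ source) (hsn : source < (graph.length : Int)) :
    (bfsLoopA graph graph.length (graph.length + 2)
        (PySem.List.pySetD (List.replicate graph.length (-1)) source 0) [source]).length
      = graph.length ∧
    ∀ k : Int, 0 ≤ k → k < (graph.length : Int) →
    (PySem.List.pyGetD
        (bfsLoopA graph graph.length (graph.length + 2)
          (PySem.List.pySetD (List.replicate graph.length (-1)) source 0) [source]) k 0 ≠ -1
      ↔ (bfsLoopB graph graph.length (graph.length + 2)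
          ((PySem.Dict.empty : PySem.Dict Int Int).insert source 0) (PySem.Set.ofList [source]) 0).getD k (-1) ≠ -1) := by
  set n := graph.length with hn
  have hset : PySem.List.pySetD (List.replicate n (-1 : Int)) source 0 =
      (List.replicate n (-1 : Int)).set source.toNat 0 :=
    PySem.List.pySetD_of_nonneg _ _ hs0
  set lv0 := PySem.List.pySetD (List.replicate n (-1 : Int)) source 0 with hlv0
  have hlen0 : lv0.length = n := by rw [hset]; simp
  have hget0 : ∀ k : Int, 0 ≤ k → k < (n : Int) →
      PySem.List.pyGetD lv0 k 0 = if k = source then 0 else -1 := by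
    intro k hk0 hkn
    rw [hset]
    have hrep : ∀ j : Int, 0 ≤ j → j < (n : Int) →
        PySem.List.pyGetD (List.replicate n (-1 : Int)) j 0 = -1 := by
      intro j hj0 hjn
      rw [pyGetD_eq_getElem' _ _ _ hj0 (by simpa using hjn)]
      simp
    rw [pyGetD_set _ source k 0 hs0 (by simpa using hsn) hk0 (by simpa using hkn)]
    split
    · rfl
    · exact hrep k hk0 hkn
  have hval0 : ∀ k : Int, 0 ≤ k → k < (n : Int) → PySem.List.pyGetD lv0 k 0 ≥ -1 := by
    intro k hk0 hkn
    rw [hget0 k hk0 hkn]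
    split <;> omega
  have hq0 : ∀ a ∈ [source], 0 ≤ a ∧ a < (n : Int) := by
    intro a ha
    simp only [List.mem_singleton] at ha
    subst ha
    exact ⟨hs0, hsn⟩
  have hclo0 : ∀ k : Int, 0 ≤ k → k < (n : Int) → PySem.List.pyGetD lv0 k 0 ≠ -1 →
      k ∈ [source] ∨ ∀ v : Int, 0 ≤ v → v < (n : Int) → edgeP graph k v →
        PySem.List.pyGetD lv0 v 0 ≠ -1 := by
    intro k hk0 hkn hkm
    rw [hget0 k hk0 hkn] at hkm
    by_cases hks : k = source
    · exact Or.inl (by simp [hks])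
    · rw [if_neg hks] at hkm
      exact absurd rfl hkm
  have hfuelA : [source].length + cntNeg lv0 ≤ n + 2 := by
    have := cntNeg_le_length lv0
    rw [hlen0] at this
    simp only [List.length_singleton]
    omega
  obtain ⟨lenA, valsA, monA, cloA⟩ :=
    loopA_main graph n (n + 2) lv0 [source] hlen0 hval0 hq0 hclo0 hfuelA
  set lvA := bfsLoopA graph n (n + 2) lv0 [source] with hlvA
  -- B's initial state
  set d0 := (PySem.Dict.empty : PySem.Dict Int Int).insert source 0 with hd0
  have hd0get : ∀ k x : Int, d0.get? k = some x → 0 ≤ x := by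
    intro k x h
    rw [hd0, PySem.Dict.get?_insert] at h
    split at h
    · cases h; omega
    · rw [PySem.Dict.get?_empty] at h
      cases h
  have hd0c : ∀ k : Int, d0.contains k = true → k = source := by
    intro k h
    rw [hd0, PySem.Dict.contains_insert] at h
    simp only [PySem.Dict.contains_empty, Bool.or_false, beq_iff_eq] at h
    exact h
  have hd0cs : d0.contains source = true := by
    rw [hd0]
    exact PySem.Dict.contains_insert_self _ _ _
  have hrange0 : ∀ k : Int, d0.contains k = true → 0 ≤ k ∧ k < (n : Int) := by
    intro k h
    rw [hd0c k h]
    exact ⟨hs0, hsn⟩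
  have hfsub0 : ∀ u ∈ PySem.Set.ofList [source], d0.contains u = true := by
    intro u hu
    have : u ∈ [source] := (PySem.Set.mem_ofList _ _).1 hu
    simp only [List.mem_singleton] at this
    subst this
    exact hd0cs
  have hsrcf : source ∈ PySem.Set.ofList [source] := (PySem.Set.mem_ofList _ _).2 (by simp)
  have hclo0B : ∀ k : Int, d0.contains k = true →
      k ∈ PySem.Set.ofList [source] ∨ ∀ v : Int, 0 ≤ v → v < (n : Int) → edgeP graph k v →
        d0.contains v = true := by
    intro k h
    rw [hd0c k h]
    exact Or.inl hsrcf
  have hfuelB : cntMiss n d0 + 2 ≤ n + 2 := by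
    have : cntMiss n d0 ≤ (List.range n).length := List.countP_le_length
    simp only [List.length_range] at this
    omega
  obtain ⟨monB, valsB, cloB⟩ :=
    loopB_main graph n (n + 2) d0 (PySem.Set.ofList [source]) 0 (by omega)
      hd0get hrange0 hfsub0 hclo0B hfuelB
  set lvB := bfsLoopB graph n (n + 2) d0 (PySem.Set.ofList [source]) 0 with hlvB
  -- A's marks lie inside B's keys
  have hAB : ∀ k : Int, 0 ≤ k → k < (n : Int) → PySem.List.pyGetD lvA k 0 ≠ -1 →
      lvB.contains k = true := by
    refine loopA_sound graph n (fun k => lvB.contains k = true) ?_ (n + 2) lv0 [source]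
      hlen0 hval0 ?_ ?_
    · intro x v hv0 hvn hx hev
      exact cloB x v hv0 hvn hx hev
    · intro k hk0 hkn hkm
      rw [hget0 k hk0 hkn] at hkm
      by_cases hks : k = source
      · subst hks
        exact monB k hd0cs
      · rw [if_neg hks] at hkm
        exact absurd rfl hkm
    · intro a ha
      simp only [List.mem_singleton] at ha
      subst ha
      exact ⟨hs0, hsn, monB a hd0cs⟩
  -- B's keys lie inside A's marks
  have hBA : ∀ k : Int, lvB.contains k = true →
      0 ≤ k ∧ k < (n : Int) ∧ PySem.List.pyGetD lvA k 0 ≠ -1 := by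
    have hsrcm : PySem.List.pyGetD lvA source 0 ≠ -1 := by
      refine monA source hs0 hsn ?_
      rw [hget0 source hs0 hsn, if_pos rfl]
      omega
    refine loopB_sound graph n
      (fun k => 0 ≤ k ∧ k < (n : Int) ∧ PySem.List.pyGetD lvA k 0 ≠ -1) ?_
      (n + 2) d0 (PySem.Set.ofList [source]) 0 ?_ ?_
    · intro x v hv0 hvn hx hev
      exact ⟨hv0, hvn, cloA x v hx.1 hx.2.1 hv0 hvn hx.2.2 hev⟩
    · intro k h
      rw [hd0c k h]
      exact ⟨hs0, hsn, hsrcm⟩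
    · intro u hu
      have : u ∈ [source] := (PySem.Set.mem_ofList _ _).1 hu
      simp only [List.mem_singleton] at this
      subst this
      exact ⟨hs0, hsn, hsrcm⟩
  refine ⟨lenA, ?_⟩
  intro k hk0 hkn
  constructor
  · intro hm
    have hc := hAB k hk0 hkn hm
    rw [PySem.Dict.contains_eq_isSome_get?] at hc
    obtain ⟨x, hx⟩ := Option.isSome_iff_exists.1 hc
    have hx0 := valsB k x hx
    rw [PySem.Dict.getD_eq_get?_getD, hx]
    simp only [Option.getD_some]
    omega
  · intro hgd
    by_cases hc : lvB.contains k = true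
    · exact (hBA k hc).2.2
    · exfalso
      have hnone : lvB.get? k = none := by
        rw [PySem.Dict.contains_eq_isSome_get?] at hc
        cases h : lvB.get? k with
        | none => rfl
        | some x => rw [h] at hc; simp at hc
      rw [PySem.Dict.getD_eq_get?_getD, hnone] at hgd
      simp at hgd

-- ===== VERDICT (by name: the statement is the Claim_ definition above) =====
theorem bfs_level_graph_spec : Claim_equal_bfs_level_graph := by
  intro graph source sink level _hdom hpre
  obtain ⟨_hrows, hs0, hsn, hsk⟩ := hpre
  unfold Spec_bfs_level_graph
  set n := graph.length with hn
  obtain ⟨lenA, hiff⟩ := marked_iff graph source hs0 hsn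
  set lvA := bfsLoopA graph n (n + 2)
    (PySem.List.pySetD (List.replicate n (-1)) source 0) [source] with hlvA
  set lvB := bfsLoopB graph n (n + 2)
    ((PySem.Dict.empty : PySem.Dict Int Int).insert source 0) (PySem.Set.ofList [source]) 0
    with hlvB
  show decide (PySem.List.pyGetD lvA sink 0 ≠ -1)
      = decide (PySem.List.pyGetD
          ((PySem.List.pyRange 0 (n : Int) 1).map (fun v => lvB.getD v (-1))) sink 0 ≠ -1)
  have hsb : -(n : Int) ≤ sink ∧ sink < (n : Int) := by
    simpa [PySem.Raise.InRange] using hsk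
  have hLlen : ((PySem.List.pyRange 0 (n : Int) 1).map (fun v => lvB.getD v (-1))).length = n := by
    simp [PySem.List.length_pyRange_one]
  have hmain : ∀ s : Int, 0 ≤ s → s < (n : Int) →
      (decide (PySem.List.pyGetD lvA s 0 ≠ -1)
        = decide (PySem.List.pyGetD
            ((PySem.List.pyRange 0 (n : Int) 1).map (fun v => lvB.getD v (-1))) s 0 ≠ -1)) := by
    intro s h0 h1
    rw [PySem.List.pyGetD_map_pyRange_of_nonneg _ _ s _ h0 h1]
    rw [decide_eq_decide]
    exact hiff s h0 h1
  by_cases hsgn : 0 ≤ sink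
  · exact hmain sink hsgn hsb.2
  · have hAshift : PySem.List.pyGetD lvA sink 0 =
        PySem.List.pyGetD lvA (sink + (n : Int)) 0 := by
      have := pyGetD_shift lvA sink 0 (by rw [lenA]; exact hsb.1) (by omega)
      rwa [lenA] at this
    have hBshift : PySem.List.pyGetD
          ((PySem.List.pyRange 0 (n : Int) 1).map (fun v => lvB.getD v (-1))) sink 0 =
        PySem.List.pyGetD
          ((PySem.List.pyRange 0 (n : Int) 1).map (fun v => lvB.getD v (-1)))
          (sink + (n : Int)) 0 := by
      have := pyGetD_shift _ sink 0 (by rw [hLlen]; exact hsb.1) (by omega)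
      rwa [hLlen] at this
    rw [hAshift, hBshift]
    exact hmain (sink + n) (by omega) (by omega)
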